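-- pv_equiv track=rewrite | github.com/Kevinwu901113/ano-rag | doc/chunker.py | _group_events_by_proximity
-- ===== SOURCE A (Python) =====
-- from typing import List, Dict, Any, Optional, Union
--
-- def _group_events_by_proximity(events: List[Dict[str, Any]]) -> List[List[Dict[str, Any]]]:
--     """按接近程度对事件分组"""
--     if not events:
--         return []
--
--     # 按位置排序
--     sorted_events = sorted(events, key=lambda x: x['start_pos'])
--
--     groups = []
--     current_group = [sorted_events[0]]
--
--     for event in sorted_events[1:]:
--         # 如果与当前组的最后一个事件距离小于200字符，加入当前组
--         if event['start_pos'] - current_group[-1]['end_pos'] <= 200: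
--             current_group.append(event)
--         else:
--             # 否则开始新组
--             groups.append(current_group)
--             current_group = [event]
--
--     if current_group:
--         groups.append(current_group)
--
--     return groups
-- ===== SOURCE B (Python) =====
-- def _take_chain(prev, rest):
--     """Split rest into its longest prefix that stays chained to prev
--     (each event starting within 200 chars of its predecessor's end)
--     and the remainder."""
--     for i, e in enumerate(rest):
--         if e['start_pos'] - prev['end_pos'] > 200:
--             return rest[:i], rest[i:]
--         prev = e
--     return rest, []
--
--
-- def _group_events_by_proximity(events):
--     """按接近程度对事件分组"""
--     if not events:
--         return []
--     se = sorted(events, key=lambda x: x['start_pos'])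
--     groups = []
--     while se:
--         head = se[0]
--         grp, se = _take_chain(head, se[1:])
--         groups.append([head] + grp)
--     return groups
-- ===== Notes on version B (the rewrite author's own statement) =====
-- stated objective: alternative
-- what changed: A makes one fold over the sorted events carrying a (groups, current_group) accumulator pair; B instead repeatedly splits the sorted list, a helper peeling off the maximal proximity-chain prefix as one finished group per outer step, so no cross-iteration group accumulator exists.
import Mathlib
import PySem

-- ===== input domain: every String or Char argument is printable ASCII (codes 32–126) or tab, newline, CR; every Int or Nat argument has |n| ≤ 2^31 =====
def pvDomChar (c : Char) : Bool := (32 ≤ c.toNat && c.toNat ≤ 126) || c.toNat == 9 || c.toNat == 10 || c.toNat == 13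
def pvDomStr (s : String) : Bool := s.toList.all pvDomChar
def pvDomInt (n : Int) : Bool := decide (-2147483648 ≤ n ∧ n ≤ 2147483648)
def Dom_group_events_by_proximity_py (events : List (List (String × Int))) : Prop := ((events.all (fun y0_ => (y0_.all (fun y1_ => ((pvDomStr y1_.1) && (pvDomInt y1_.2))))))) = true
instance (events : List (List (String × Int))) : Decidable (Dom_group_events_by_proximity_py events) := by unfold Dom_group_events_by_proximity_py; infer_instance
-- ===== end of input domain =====

-- B splits the sorted list group-at-a-time (a helper peels off the maximal proximity
-- chain, the outer loop collects the groups) instead of A's single fold carrying a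
-- groups/current_group accumulator pair; objective: alternative decomposition.

-- ===== PORT A =====
-- e['start_pos'] / e['end_pos']: first-match dict lookup; default 0 is only reached
-- outside Pre_ (where the Python raises KeyError).
def pvGetKey (e : List (String × Int)) (k : String) : Int :=
  ((PySem.Dict.mk e).get? k).getD 0

def group_events_by_proximity_py (events : List (List (String × Int))) : List (List (List (String × Int))) :=
  if events = [] then []
  else
    let sorted_events := PySem.List.sorted events (fun x => pvGetKey x "start_pos") false
    match sorted_events with
    | [] => []
    | e0 :: rest =>
      let st := rest.foldl
        (fun (acc : List (List (List (String × Int))) × List (List (String × Int))) event =>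
          if pvGetKey event "start_pos"
               - pvGetKey ((PySem.List.pyGet? acc.2 (-1)).getD []) "end_pos" ≤ 200 then
            (acc.1, acc.2 ++ [event])
          else
            (acc.1 ++ [acc.2], [event]))
        ([], [e0])
      if st.2 = [] then st.1 else st.1 ++ [st.2]

-- ===== PORT B =====
-- _take_chain: longest prefix of rest chained to prev, plus the remainder.
def pvTakeChain (prev : List (String × Int)) :
    List (List (String × Int)) → List (List (String × Int)) × List (List (String × Int))
  | [] => ([], [])
  | e :: rest =>
    if pvGetKey e "start_pos" - pvGetKey prev "end_pos" > 200 then ([], e :: rest)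
    else
      let gr := pvTakeChain e rest
      (e :: gr.1, gr.2)

theorem pvTakeChain_snd_length (prev : List (String × Int))
    (rest : List (List (String × Int))) :
    (pvTakeChain prev rest).2.length ≤ rest.length := by
  induction rest generalizing prev with
  | nil => simp [pvTakeChain]
  | cons e rs ih =>
    simp only [pvTakeChain]
    split
    · simp
    · exact le_trans (ih e) (Nat.le_succ _)

-- the while loop of B: peel off one group, recurse on the remainder
def pvChunks : List (List (String × Int)) → List (List (List (String × Int)))
  | [] => []
  | head :: tl =>
    let gr := pvTakeChain head tl
    (head :: gr.1) :: pvChunks gr.2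
termination_by xs => xs.length
decreasing_by
  exact Nat.lt_succ_of_le (pvTakeChain_snd_length head tl)

def group_events_by_proximity_py_alt (events : List (List (String × Int))) : List (List (List (String × Int))) :=
  if events = [] then []
  else pvChunks (PySem.List.sorted events (fun x => pvGetKey x "start_pos") false)

-- ===== PRECONDITION & SPEC =====
-- first-match 'start_pos' lookup, for Pre_ only (default unreachable under Pre_'s first conjunct)
def pvStartOf (e : List (String × Int)) : Int := (e.lookup "start_pos").getD 0

-- Pre_ excludes exactly the inputs on which A raises KeyError: some event lacks a
-- 'start_pos' key, or an event other than the stable-sort-last one (the only event whose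
-- 'end_pos' is never read) lacks an 'end_pos' key.
def Pre_group_events_by_proximity_py (events : List (List (String × Int))) : Prop :=
  (∀ e ∈ events, "start_pos" ∈ e.map Prod.fst) ∧
  (∀ i : Fin events.length, "end_pos" ∉ (events.get i).map Prod.fst →
    ∀ j : Fin events.length,
      pvStartOf (events.get j) < pvStartOf (events.get i) ∨
      (pvStartOf (events.get j) = pvStartOf (events.get i) ∧ (j : Nat) ≤ (i : Nat)))
instance (events : List (List (String × Int))) : Decidable (Pre_group_events_by_proximity_py events) := by unfold Pre_group_events_by_proximity_py; infer_instance

def pvWitness_group_events_by_proximity_py : (List (List (String × Int))) :=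
  [[("start_pos", 0), ("end_pos", 5)], [("start_pos", 300), ("end_pos", 320)]]

def Spec_group_events_by_proximity_py (events : List (List (String × Int))) (out : List (List (List (String × Int)))) : Prop := out = group_events_by_proximity_py_alt events
instance (events : List (List (String × Int))) (out : List (List (List (String × Int)))) : Decidable (Spec_group_events_by_proximity_py events out) := by unfold Spec_group_events_by_proximity_py; infer_instance

-- ===== CLAIM (what is proved, stated in full; the proofs are below) =====
def Claim_equal_group_events_by_proximity_py : Prop := ∀ (events : List (List (String × Int))), Dom_group_events_by_proximity_py events → Pre_group_events_by_proximity_py events → Spec_group_events_by_proximity_py events (group_events_by_proximity_py events)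

-- ===== LEMMAS AND PROOFS =====

-- the state of A's loop is (groups, cur ++ [prev]); it denotes groups ++ pvChunksWith cur prev rest
def pvChunksWith (cur : List (List (String × Int))) (prev : List (String × Int))
    (rest : List (List (String × Int))) : List (List (List (String × Int))) :=
  let gr := pvTakeChain prev rest
  ((cur ++ [prev]) ++ gr.1) :: pvChunks gr.2

theorem pvChunks_cons (head : List (String × Int)) (tl : List (List (String × Int))) :
    pvChunks (head :: tl) = pvChunksWith [] head tl := by
  rw [pvChunks]
  simp [pvChunksWith]

theorem pvFold_inv (rest : List (List (String × Int)))
    (groups : List (List (List (String × Int))))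
    (cur : List (List (String × Int))) (prev : List (String × Int)) :
    (let st := rest.foldl
        (fun (acc : List (List (List (String × Int))) × List (List (String × Int))) event =>
          if pvGetKey event "start_pos"
               - pvGetKey ((PySem.List.pyGet? acc.2 (-1)).getD []) "end_pos" ≤ 200 then
            (acc.1, acc.2 ++ [event])
          else
            (acc.1 ++ [acc.2], [event]))
        (groups, cur ++ [prev])
      if st.2 = [] then st.1 else st.1 ++ [st.2])
    = groups ++ pvChunksWith cur prev rest := by
  induction rest generalizing groups cur prev with
  | nil =>
    simp [pvChunksWith, pvTakeChain, pvChunks]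
  | cons x rs ih =>
    simp only [List.foldl_cons, PySem.List.pyGet?_neg_one_append_singleton, Option.getD_some]
    by_cases h : pvGetKey x "start_pos" - pvGetKey prev "end_pos" ≤ 200
    · rw [if_pos h]
      have := ih groups (cur ++ [prev]) x
      rw [this]
      have hchain : pvTakeChain prev (x :: rs)
          = (x :: (pvTakeChain x rs).1, (pvTakeChain x rs).2) := by
        rw [pvTakeChain, if_neg (by omega)]
      simp [pvChunksWith, hchain, List.append_assoc]
    · rw [if_neg h]
      have := ih (groups ++ [cur ++ [prev]]) [] x
      simp only [List.nil_append] at this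
      rw [this]
      have hchain : pvTakeChain prev (x :: rs) = ([], x :: rs) := by
        rw [pvTakeChain, if_pos (by omega)]
      simp [pvChunksWith, hchain, pvChunks_cons, List.append_assoc]

-- ===== VERDICT (by name: the statement is the Claim_ definition above) =====
theorem group_events_by_proximity_py_spec : Claim_equal_group_events_by_proximity_py := by
  intro events _ _
  unfold Spec_group_events_by_proximity_py group_events_by_proximity_py group_events_by_proximity_py_alt
  by_cases hne : events = []
  · simp [hne]
  · rw [if_neg hne, if_neg hne]
    rcases hs : PySem.List.sorted events (fun x => pvGetKey x "start_pos") false with _ | ⟨e0, rest⟩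
    · have hp := PySem.List.sorted_perm events (fun x => pvGetKey x "start_pos") false
      rw [hs] at hp
      exact absurd hp.nil_eq.symm hne
    · have := pvFold_inv rest [] [] e0
      simp only [List.nil_append] at this
      simpa [pvChunks_cons] using this
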